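-- pv_equiv track=rewrite | github.com/safx/nu-scraper | generate-openapi.py | toPath
-- ===== SOURCE A (Python) =====
-- def toPath(url: str, serverUrl: str) -> str:
--     def toTemplate(c: str) -> str:
--         if len(c) > 0 and c[0] == ':':
--             return '{' + c[1:] + '}'
--         elif len(c) > 0 and c[:2] == '@:': # FIXME: handle for spacical case
--             return '@{' + c[2:] + '}'
--         return c
--
--     path = url[len(serverUrl):] if url.find(serverUrl) == 0 else url
--     comp = [toTemplate(c) for c in path.split('/')]
--     return '/'.join(comp)
-- ===== SOURCE B (Python) =====
-- def toPath(url: str, serverUrl: str) -> str: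
--     path = url[len(serverUrl):] if url.startswith(serverUrl) else url
--     out = []
--     state = 0  # 0: at segment start, 1: '@' pending at segment start, 2: plain text, 3: inside template
--     for ch in path:
--         if state == 0:
--             if ch == ':':
--                 out.append('{'); state = 3
--             elif ch == '@':
--                 state = 1
--             elif ch == '/':
--                 out.append('/')
--             else:
--                 out.append(ch); state = 2
--         elif state == 1:
--             if ch == ':':
--                 out.append('@{'); state = 3
--             elif ch == '/':
--                 out.append('@/'); state = 0
--             else:
--                 out.append('@' + ch); state = 2
--         elif state == 3:
--             if ch == '/':
--                 out.append('}/'); state = 0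
--             else:
--                 out.append(ch)
--         else:
--             if ch == '/':
--                 out.append('/'); state = 0
--             else:
--                 out.append(ch)
--     if state == 1:
--         out.append('@')
--     elif state == 3:
--         out.append('}')
--     return ''.join(out)
-- ===== Notes on version B (the rewrite author's own statement) =====
-- stated objective: alternative
-- what changed: A splits the path on '/', maps a per-component template helper and rejoins; B makes a single left-to-right character scan with a four-state machine (segment start / pending '@' / plain / inside template) that emits the output directly, never materialising the component list.
import Mathlib
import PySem

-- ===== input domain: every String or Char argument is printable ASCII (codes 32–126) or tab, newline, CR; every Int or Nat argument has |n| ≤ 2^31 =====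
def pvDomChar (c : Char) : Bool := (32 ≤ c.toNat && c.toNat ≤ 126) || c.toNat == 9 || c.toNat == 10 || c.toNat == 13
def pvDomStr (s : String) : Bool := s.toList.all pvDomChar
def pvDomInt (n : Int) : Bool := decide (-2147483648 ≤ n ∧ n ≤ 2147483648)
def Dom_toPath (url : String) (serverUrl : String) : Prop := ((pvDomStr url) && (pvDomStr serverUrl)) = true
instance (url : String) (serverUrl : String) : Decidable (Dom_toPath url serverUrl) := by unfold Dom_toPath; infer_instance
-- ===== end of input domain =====

-- B replaces A's split-into-segments / map toTemplate / rejoin pipeline by a single left-to-right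
-- character scan with a four-state machine (segment start / pending '@' / plain / inside template);
-- objective: alternative single-pass structure, same cost.

-- ===== PORT A =====
-- port of A's inner helper toTemplate (on one '/'-separated component, as List Char)
def toTemplateA (c : List Char) : List Char :=
  if decide (0 < PySem.Chars.len c) && (PySem.List.pyGet? c 0 == some ':') then
    '{' :: (PySem.List.slice c (some 1) none ++ ['}'])
  else if decide (0 < PySem.Chars.len c) && (PySem.List.slice c none (some 2) == ['@', ':']) then
    '@' :: '{' :: (PySem.List.slice c (some 2) none ++ ['}'])
  else c

def toPath (url : String) (serverUrl : String) : String :=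
  let u := url.toList
  let sv := serverUrl.toList
  let path := if PySem.Chars.find u sv == 0 then PySem.List.slice u (some (sv.length : Int)) none else u
  let comp := (PySem.Chars.splitOn path ['/']).map toTemplateA
  String.ofList (PySem.Chars.join ['/'] comp)

-- ===== PORT B =====
-- one step of Source B's state machine: state 0 = at segment start, 1 = '@' pending at segment
-- start, 3 = inside a template, otherwise (2) = plain text
def bStep (st : Nat × List Char) (ch : Char) : Nat × List Char :=
  let s := st.1
  let out := st.2
  if s = 0 then
    if ch = ':' then (3, out ++ ['{'])
    else if ch = '@' then (1, out)
    else if ch = '/' then (0, out ++ ['/'])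
    else (2, out ++ [ch])
  else if s = 1 then
    if ch = ':' then (3, out ++ ['@', '{'])
    else if ch = '/' then (0, out ++ ['@', '/'])
    else (2, out ++ ['@', ch])
  else if s = 3 then
    if ch = '/' then (0, out ++ ['}', '/'])
    else (3, out ++ [ch])
  else
    if ch = '/' then (0, out ++ ['/'])
    else (2, out ++ [ch])

def toPath_alt (url : String) (serverUrl : String) : String :=
  let u := url.toList
  let sv := serverUrl.toList
  let path := if PySem.Chars.startswith u sv then PySem.List.slice u (some (sv.length : Int)) none else u
  let r := path.foldl bStep (0, [])
  String.ofList (r.2 ++ (if r.1 = 1 then ['@'] else if r.1 = 3 then ['}'] else []))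

-- ===== PRECONDITION & SPEC =====
def Spec_toPath (url : String) (serverUrl : String) (out : String) : Prop := out = toPath_alt url serverUrl
instance (url : String) (serverUrl : String) (out : String) : Decidable (Spec_toPath url serverUrl out) := by unfold Spec_toPath; infer_instance

-- ===== CLAIM (what is proved, stated in full; the proofs are below) =====
def Claim_equal_toPath : Prop := ∀ (url : String) (serverUrl : String), Dom_toPath url serverUrl → Spec_toPath url serverUrl (toPath url serverUrl)

-- ===== LEMMAS AND PROOFS =====

-- B's machine, written as structural recursion emitting output directly (proof helper)
def runB : Nat → List Char → List Char
  | s, [] => if s = 1 then ['@'] else if s = 3 then ['}'] else []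
  | s, c :: l =>
    if s = 0 then
      if c = ':' then '{' :: runB 3 l
      else if c = '@' then runB 1 l
      else if c = '/' then '/' :: runB 0 l
      else c :: runB 2 l
    else if s = 1 then
      if c = ':' then '@' :: '{' :: runB 3 l
      else if c = '/' then '@' :: '/' :: runB 0 l
      else '@' :: c :: runB 2 l
    else if s = 3 then
      if c = '/' then '}' :: '/' :: runB 0 l
      else c :: runB 3 l
    else
      if c = '/' then '/' :: runB 0 l
      else c :: runB 2 l

-- the foldl machine of the port equals runB
theorem foldl_bStep_eq_runB (l : List Char) : ∀ (s : Nat) (out : List Char),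
    (l.foldl bStep (s, out)).2 ++
      (if (l.foldl bStep (s, out)).1 = 1 then ['@'] else if (l.foldl bStep (s, out)).1 = 3 then ['}'] else []) =
    out ++ runB s l := by
  induction l with
  | nil => intro s out; rw [List.foldl_nil, runB]
  | cons c l ih =>
    intro s out
    rw [List.foldl_cons, runB]
    show (l.foldl bStep (bStep (s, out) c)).2 ++ _ = _
    by_cases h0 : s = 0 <;> by_cases h1 : s = 1 <;> by_cases h3 : s = 3 <;>
      by_cases hc1 : c = ':' <;> by_cases hc2 : c = '@' <;> by_cases hc3 : c = '/' <;>
      simp only [bStep, h0, h1, h3, hc1, hc2, hc3, if_true, if_false] <;>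
      (try rw [ih]) <;> (try simp)

-- A-side composite on a path: join of templated components
def joinT (ps : List (List Char)) : List Char := PySem.Chars.join ['/'] (ps.map toTemplateA)

def tailK (ts : List (List Char)) : List Char :=
  if ts = [] then [] else '/' :: joinT ts

theorem joinT_cons (h : List Char) (t : List (List Char)) : joinT (h :: t) = toTemplateA h ++ tailK t := by
  cases t with
  | nil => simp [joinT, tailK, PySem.Chars.join_singleton]
  | cons b bs => simp [joinT, tailK, PySem.Chars.join_cons_cons]

-- computation lemmas for toTemplateA
theorem tA_nil : toTemplateA [] = [] := by decide
theorem tA_colon (xs : List Char) : toTemplateA (':' :: xs) = '{' :: (xs ++ ['}']) := by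
  simp [toTemplateA, PySem.Chars.len, PySem.List.pyGet?, PySem.List.pyIdx?, PySem.List.slice_from_one]
theorem tA_at_colon (xs : List Char) : toTemplateA ('@' :: ':' :: xs) = '@' :: '{' :: (xs ++ ['}']) := by
  have h2 : PySem.List.slice ('@' :: ':' :: xs) none (some 2) = ['@', ':'] := by
    simpa using PySem.List.slice_to_natCast ('@' :: ':' :: xs) 2
  have h2' : PySem.List.slice ('@' :: ':' :: xs) (some 2) none = xs := by
    simpa using PySem.List.slice_from_natCast ('@' :: ':' :: xs) 2
  have h0 : ((0:Int) ≤ (xs.length:Int) + 1) := by omega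
  simp [toTemplateA, PySem.Chars.len, PySem.List.pyGet?, PySem.List.pyIdx?, h0, h2, h2']
theorem tA_at_other (c : Char) (xs : List Char) (hc : c ≠ ':') : toTemplateA ('@' :: c :: xs) = '@' :: c :: xs := by
  have h2 : PySem.List.slice ('@' :: c :: xs) none (some 2) = ['@', c] := by
    simpa using PySem.List.slice_to_natCast ('@' :: c :: xs) 2
  have h0 : ((0:Int) ≤ (xs.length:Int) + 1) := by omega
  simp [toTemplateA, PySem.Chars.len, PySem.List.pyGet?, PySem.List.pyIdx?, h0, h2, hc]
theorem tA_at_nil : toTemplateA ['@'] = ['@'] := by decide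
theorem tA_other (c : Char) (xs : List Char) (h1 : c ≠ ':') (h2 : c ≠ '@') : toTemplateA (c :: xs) = c :: xs := by
  have h3 : PySem.List.slice (c :: xs) none (some 2) = (c :: xs).take 2 := by
    simpa using PySem.List.slice_to_natCast (c :: xs) 2
  simp [toTemplateA, PySem.Chars.len, PySem.List.pyGet?, PySem.List.pyIdx?, h3, h1, h2]

-- the main invariant: the machine from each state versus the split of the remaining input
theorem runB_eq (l : List Char) :
    runB 0 l = joinT (l.splitOnP (· == '/')) ∧
    runB 1 l = joinT ((l.splitOnP (· == '/')).modifyHead ('@' :: ·)) ∧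
    runB 2 l = (l.splitOnP (· == '/')).headI ++ tailK (l.splitOnP (· == '/')).tail ∧
    runB 3 l = (l.splitOnP (· == '/')).headI ++ '}' :: tailK (l.splitOnP (· == '/')).tail := by
  induction l with
  | nil =>
    refine ⟨?_, ?_, ?_, ?_⟩ <;>
      simp [runB, List.splitOnP_nil, joinT, tailK, PySem.Chars.join_singleton, tA_nil, tA_at_nil]
  | cons c l ih =>
    obtain ⟨ih0, ih1, ih2, ih3⟩ := ih
    obtain ⟨h', t', he⟩ := List.exists_cons_of_ne_nil (List.splitOnP_ne_nil (p := (· == '/')) l)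
    by_cases hc : c = '/'
    · subst hc
      have hs : ('/' :: l).splitOnP (· == '/') = [] :: l.splitOnP (· == '/') := by
        rw [List.splitOnP_cons]; simp
      refine ⟨?_, ?_, ?_, ?_⟩ <;>
        rw [runB] <;>
        simp [hs, joinT_cons, tA_nil, tA_at_nil, tailK, he, ih0, List.modifyHead]
    · have hs : (c :: l).splitOnP (· == '/') = (c :: h') :: t' := by
        rw [List.splitOnP_cons]; simp [hc, he, List.modifyHead]
      have hl : l.splitOnP (· == '/') = h' :: t' := he
      refine ⟨?_, ?_, ?_, ?_⟩ <;> rw [runB]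
      · by_cases hc1 : c = ':'
        · subst hc1
          simp only [if_true, hs, joinT_cons, tA_colon]
          rw [ih3, hl]
          simp [List.headI, List.tail]
        · by_cases hc2 : c = '@'
          · subst hc2
            simp only [if_true, if_false, hc1, hs]
            rw [ih1, hl]
            simp [List.modifyHead]
          · simp only [hc1, hc2, hc, if_false, hs, joinT_cons, tA_other c h' hc1 hc2]
            rw [ih2, hl]
            simp [List.headI, List.tail]
      · by_cases hc1 : c = ':'
        · subst hc1
          simp only [if_true, hs, List.modifyHead, joinT_cons, tA_at_colon]
          rw [ih3, hl]
          simp [List.headI, List.tail]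
        · simp only [hc1, hc, if_false, hs, List.modifyHead, joinT_cons,
            tA_at_other c h' hc1]
          rw [ih2, hl]
          simp [List.headI, List.tail]
      · simp only [hc, if_false, hs, List.headI, List.tail]
        rw [ih2, hl]
        simp [List.headI, List.tail]
      · simp only [hc, if_false, hs, List.headI, List.tail]
        rw [ih3, hl]
        simp [List.headI, List.tail]

-- PySem.Chars.splitOn with the one-character separator '/' is List.splitOnP (· == '/')
theorem go_eq (fuel : Nat) : ∀ (l cur : List Char) (acc : List (List Char)), l.length < fuel →
    PySem.Chars.splitOn.go ['/'] fuel l cur acc =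
      acc.reverse ++ (l.splitOnP (· == '/')).modifyHead (cur.reverse ++ ·) := by
  induction fuel with
  | zero => intro l cur acc h; omega
  | succ n ih =>
    intro l cur acc h
    cases l with
    | nil =>
      simp [PySem.Chars.splitOn.go, List.splitOnP_nil]
    | cons c rest =>
      rw [PySem.Chars.splitOn.go]
      by_cases hc : c = '/'
      · subst hc
        have hp : List.isPrefixOf ['/'] ('/' :: rest) = true := by simp [List.isPrefixOf]
        rw [if_pos hp]
        rw [show List.drop (['/'] : List Char).length ('/' :: rest) = rest from rfl]
        rw [ih rest [] (cur.reverse :: acc) (by simpa using Nat.lt_of_succ_lt_succ h)]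
        simp only [List.splitOnP_cons]
        obtain ⟨h', t', he⟩ := List.exists_cons_of_ne_nil (List.splitOnP_ne_nil (p := (· == '/')) rest)
        simp [he, List.modifyHead]
      · have hp : List.isPrefixOf ['/'] (c :: rest) = false := by
          simp [List.isPrefixOf]; exact fun hh => (hc hh.symm).elim
        rw [if_neg (by simp [hp])]
        rw [ih rest (c :: cur) acc (by simpa using Nat.lt_of_succ_lt_succ h)]
        have hne := List.splitOnP_ne_nil (p := (· == '/')) rest
        obtain ⟨h', t', he⟩ := List.exists_cons_of_ne_nil hne
        simp [List.splitOnP_cons, hc, he, List.modifyHead]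
theorem splitOn_slash (l : List Char) : PySem.Chars.splitOn l ['/'] = l.splitOnP (· == '/') := by
  rw [PySem.Chars.splitOn, go_eq (l.length + 1) l [] [] (by omega)]
  have hne := List.splitOnP_ne_nil (p := (· == '/')) l
  obtain ⟨h', t', he⟩ := List.exists_cons_of_ne_nil hne
  simp [he, List.modifyHead]

-- A's prefix test (find == 0) agrees with B's (startswith)
theorem find_eq_zero_iff_startswith (u sv : List Char) :
    (PySem.Chars.find u sv == 0) = PySem.Chars.startswith u sv := by
  by_cases h : sv <+: u
  · have h0 : 0 ≤ PySem.Chars.find u sv := (PySem.Chars.find_nonneg_iff u sv).2 h.isInfix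
    have hle : PySem.Chars.find u sv ≤ 0 := by
      by_contra hgt
      rw [not_le] at hgt
      have := (PySem.Chars.find_spec h0).2 0 (by omega)
      simp at this
      exact this h
    have : PySem.Chars.find u sv = 0 := le_antisymm hle h0
    simp [this, (PySem.Chars.startswith_iff u sv).2 h]
  · have : PySem.Chars.find u sv ≠ 0 := by
      intro h0
      have := (PySem.Chars.find_spec (s := u) (sub := sv) (by omega)).1
      rw [h0] at this
      simp at this
      exact h this
    have hsw : PySem.Chars.startswith u sv = false := by
      rw [← Bool.not_eq_true, PySem.Chars.startswith_iff]; exact h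
    simp [hsw, this]

-- ===== VERDICT (by name: the statement is the Claim_ definition above) =====
theorem toPath_spec : Claim_equal_toPath := by
  intro url serverUrl _
  show toPath url serverUrl = toPath_alt url serverUrl
  unfold toPath toPath_alt
  simp only [find_eq_zero_iff_startswith]
  set path := (if PySem.Chars.startswith url.toList serverUrl.toList then
      PySem.List.slice url.toList (some (serverUrl.toList.length : Int)) none else url.toList)
  have h1 := foldl_bStep_eq_runB path 0 []
  have h2 := (runB_eq path).1
  rw [splitOn_slash path]
  congr 1
  rw [h1, h2]
  simp [joinT]
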